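-- pv_equiv track=rewrite | github.com/collhoun/Lab_1 | src/calculator.py | insert_zeroes
-- ===== SOURCE A (Python) =====
-- def insert_zeroes(tokens: list) -> list:
--     """
--     This function if needed to define the unary operators
--
--     Args:
--         tokens (list): list of tokens created from func "tokenization"
--
--     Returns:
--         list: list of tokens with inserted zeroes
--     """
--     if tokens[0] == '-' or tokens[0] == '+':
--         tokens.insert(0, '0')
--
--     for i, value in enumerate(tokens):
--         if tokens[i] == '(' and len(tokens) > i+1 and tokens[i+1] == '-':
--             tokens.insert(i+1, '0')
--         elif tokens[i] == '(' and len(tokens) > i+1 and tokens[i+1] == '+':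
--             tokens.insert(i+1, '0')
--
--     return tokens
-- ===== SOURCE B (Python) =====
-- def insert_zeroes(tokens: list) -> list:
--     """Single forward pass tracking the previous token; rebuilds the list once
--     and writes it back into the argument (same in-place mutation as A)."""
--     first = tokens[0]  # IndexError on empty input, like the original
--     out = ['0'] if first in ('-', '+') else []
--     prev = None
--     for t in tokens:
--         if prev == '(' and t in ('-', '+'):
--             out.append('0')
--         out.append(t)
--         prev = t
--     tokens[:] = out
--     return tokens
-- ===== Notes on version B (the rewrite author's own statement) =====
-- stated objective: simpler
-- what changed: A inserts into the list while enumerate iterates over it (relying on index shifting); B does one clean forward pass that tracks the previous token and builds the output list once, then writes it back into the argument.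
import Mathlib
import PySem

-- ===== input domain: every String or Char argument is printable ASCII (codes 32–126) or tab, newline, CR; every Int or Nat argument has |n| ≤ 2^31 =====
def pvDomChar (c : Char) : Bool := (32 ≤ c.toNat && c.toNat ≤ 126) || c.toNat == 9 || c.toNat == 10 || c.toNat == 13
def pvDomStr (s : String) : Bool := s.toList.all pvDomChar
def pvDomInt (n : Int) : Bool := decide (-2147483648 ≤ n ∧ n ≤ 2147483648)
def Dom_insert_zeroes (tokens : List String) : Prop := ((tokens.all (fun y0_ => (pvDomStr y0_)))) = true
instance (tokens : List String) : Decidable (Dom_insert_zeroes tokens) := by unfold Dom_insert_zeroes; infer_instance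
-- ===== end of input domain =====

-- B replaces A's insert-while-enumerating loop by one forward pass that tracks the
-- previous token and rebuilds the list (then writes it back into the argument);
-- both mutate the argument in place, the theorem is about the returned value.


-- ===== PORT A =====
-- A's for-loop: enumerate walks the live list while '0' gets inserted at i+1;
-- modelled as recursion on the not-yet-visited suffix (the insertion puts "0"
-- at the head of the tail, exactly as tokens.insert(i+1,'0') does relative to i).
def insertZeroesLoopA (l : List String) : List String :=
  match l with
  | [] => []
  | t :: rest =>
    if t = "(" ∧ (rest.head? = some "-" ∨ rest.head? = some "+") then
      t :: insertZeroesLoopA ("0" :: rest)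
    else
      t :: insertZeroesLoopA rest
termination_by (l.count "(", l.length)
decreasing_by
  · apply Prod.Lex.left
    rename_i h
    simp [h.1]
  · by_cases ht : t = "("
    · exact Prod.Lex.left _ _ (by simp [ht])
    · have hc : rest.count "(" = (t :: rest).count "(" := by simp [ht]
      exact hc ▸ Prod.Lex.right _ (by simp)

-- tokens[0] raises IndexError on [] (excluded by Pre_); here the [] branch is inert.
def insert_zeroes (tokens : List String) : List String :=
  let t := if tokens.head? = some "-" ∨ tokens.head? = some "+" then "0" :: tokens else tokens
  insertZeroesLoopA t

-- ===== PORT B =====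
-- B's loop: previous token in `prev`, emit "0" before a sign that follows "(".
def insertZeroesLoopB (prev : Option String) (l : List String) : List String :=
  match l with
  | [] => []
  | t :: rest =>
    (if prev = some "(" ∧ (t = "-" ∨ t = "+") then ["0", t] else [t]) ++
      insertZeroesLoopB (some t) rest

def insert_zeroes_alt (tokens : List String) : List String :=
  match tokens with
  | [] => []   -- B raises IndexError here too (outside Pre_)
  | first :: _ =>
    (if first = "-" ∨ first = "+" then ["0"] else []) ++ insertZeroesLoopB none tokens

-- ===== PRECONDITION & SPEC =====
-- Pre_ excludes only the empty list, on which both A and B raise IndexError at tokens[0].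
def Pre_insert_zeroes (tokens : List String) : Prop := tokens ≠ []
instance (tokens : List String) : Decidable (Pre_insert_zeroes tokens) := by
  unfold Pre_insert_zeroes; infer_instance
def pvWitness_insert_zeroes : List String := ["(", "-", "3", ")"]

def Spec_insert_zeroes (tokens : List String) (out : List String) : Prop := out = insert_zeroes_alt tokens
instance (tokens : List String) (out : List String) : Decidable (Spec_insert_zeroes tokens out) := by unfold Spec_insert_zeroes; infer_instance

-- ===== CLAIM (what is proved, stated in full; the proofs are below) =====
def Claim_equal_insert_zeroes : Prop := ∀ (tokens : List String), Dom_insert_zeroes tokens → Pre_insert_zeroes tokens → Spec_insert_zeroes tokens (insert_zeroes tokens)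

-- ===== LEMMAS AND PROOFS =====

-- B's look-back pass equals A's look-ahead pass, up to the pending "0" that a
-- preceding "(" forces when the suffix starts with a sign.
lemma loopB_eq_loopA (l : List String) : ∀ prev : Option String,
    insertZeroesLoopB prev l =
      (if prev = some "(" ∧ (l.head? = some "-" ∨ l.head? = some "+")
        then "0" :: insertZeroesLoopA l else insertZeroesLoopA l) := by
  induction l with
  | nil => intro prev; simp [insertZeroesLoopB, insertZeroesLoopA]
  | cons t rest ih =>
    intro prev
    rw [insertZeroesLoopB, ih (some t), insertZeroesLoopA]
    by_cases hp : t = "("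
    · subst hp
      by_cases hs : rest.head? = some "-" ∨ rest.head? = some "+"
      · simp [hs, insertZeroesLoopA]
      · simp [hs]
    · by_cases hsign : t = "-" ∨ t = "+"
      · have hne : ¬ (t = "(" ∧ (rest.head? = some "-" ∨ rest.head? = some "+")) := by
          intro h; exact hp h.1
        by_cases hprev : prev = some "("
        · simp [hp, hsign, hprev]
        · simp [hp, hsign, hprev]
      · simp [hp, hsign]

lemma loopA_zero_cons (rest : List String) :
    insertZeroesLoopA ("0" :: rest) = "0" :: insertZeroesLoopA rest := by
  rw [insertZeroesLoopA]
  simp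

-- ===== VERDICT (by name: the statement is the Claim_ definition above) =====
theorem insert_zeroes_spec : Claim_equal_insert_zeroes := by
  intro tokens _ hpre
  unfold Spec_insert_zeroes insert_zeroes insert_zeroes_alt
  match tokens with
  | [] => exact absurd rfl hpre
  | first :: rest =>
    by_cases hs : first = "-" ∨ first = "+"
    · have hh : (first :: rest).head? = some "-" ∨ (first :: rest).head? = some "+" := by
        rcases hs with h | h <;> simp [h]
      rw [if_pos hh, loopA_zero_cons, loopB_eq_loopA]
      simp [hs]
    · have hh : ¬ ((first :: rest).head? = some "-" ∨ (first :: rest).head? = some "+") := by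
        simp only [List.head?_cons, Option.some.injEq]
        rintro (h | h) <;> exact hs (by simp [h])
      rw [if_neg hh, loopB_eq_loopA]
      simp [hs]
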